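-- pv_equiv track=rewrite | github.com/Knack117/Archive-of-Argentum | aoa/utils/edhrec_commander.py | _order_commander_headers
-- ===== SOURCE A (Python) =====
-- from typing import Any, Dict, List, Optional, Set, Tuple
--
-- def _order_commander_headers(keys: List[str]) -> List[str]:
--     """Order commander headers by preference."""
--     preferred = [
--         "Signature Cards",
--         "High Synergy Cards",
--         "Top Cards",
--         "New Cards",
--         "Top Partners",
--         "Top Commanders",
--         "New Commanders",
--         "Combo Cards",
--         "Combos",
--         "Creatures",
--         "Instants",
--         "Sorceries",
--         "Artifacts",
--         "Enchantments",
--         "Planeswalkers",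
--         "Lands",
--     ]
--
--     ordered = []
--     seen = set()
--
--     # Add preferred headers first
--     for name in preferred:
--         if name in keys and name not in seen:
--             ordered.append(name)
--             seen.add(name)
--
--     # Add remaining headers
--     for key in keys:
--         if key not in seen:
--             ordered.append(key)
--             seen.add(key)
--
--     return ordered
-- ===== SOURCE B (Python) =====
-- def _order_commander_headers(keys):
--     """Order commander headers by preference (bucket concatenation)."""
--     preferred = [
--         "Signature Cards",
--         "High Synergy Cards",
--         "Top Cards",
--         "New Cards",
--         "Top Partners",
--         "Top Commanders",
--         "New Commanders",
--         "Combo Cards",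
--         "Combos",
--         "Creatures",
--         "Instants",
--         "Sorceries",
--         "Artifacts",
--         "Enchantments",
--         "Planeswalkers",
--         "Lands",
--     ]
--     deduped = list(dict.fromkeys(keys))
--
--     def rank(k):
--         return preferred.index(k) if k in preferred else len(preferred)
--
--     return [k for i in range(len(preferred) + 1) for k in deduped if rank(k) == i]
-- ===== Notes on version B (the rewrite author's own statement) =====
-- stated objective: alternative
-- what changed: Replaces A's two sequential scans sharing a mutable seen-set with a dedup-once (dict.fromkeys) pass followed by a bucket concatenation: one bucket per preference rank (non-preferred keys in a final bucket), concatenated in rank order.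
import Mathlib
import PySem

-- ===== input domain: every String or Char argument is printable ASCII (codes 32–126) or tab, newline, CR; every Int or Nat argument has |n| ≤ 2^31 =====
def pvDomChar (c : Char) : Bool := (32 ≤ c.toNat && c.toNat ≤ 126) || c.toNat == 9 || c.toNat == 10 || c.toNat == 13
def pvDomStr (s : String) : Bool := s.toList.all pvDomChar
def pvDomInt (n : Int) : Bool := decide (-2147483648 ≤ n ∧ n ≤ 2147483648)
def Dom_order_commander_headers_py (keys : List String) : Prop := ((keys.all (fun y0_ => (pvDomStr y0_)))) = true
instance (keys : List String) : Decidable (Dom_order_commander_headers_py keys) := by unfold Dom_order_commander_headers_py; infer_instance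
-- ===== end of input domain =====

-- B replaces A's two scans sharing a mutable seen-set by dedup-once + bucket concatenation per preference rank (objective: alternative algorithm, same return value).


-- ===== PORT A =====
def order_commander_headers_py (keys : List String) : List String :=
  let preferred : List String :=
    ["Signature Cards", "High Synergy Cards", "Top Cards", "New Cards",
     "Top Partners", "Top Commanders", "New Commanders", "Combo Cards",
     "Combos", "Creatures", "Instants", "Sorceries", "Artifacts",
     "Enchantments", "Planeswalkers", "Lands"]
  -- first loop: add preferred headers present in keys, tracking 'seen'
  let st1 := preferred.foldl
    (fun (st : List String × PySem.Set String) name =>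
      if name ∈ keys ∧ ¬ name ∈ st.2 then (st.1 ++ [name], PySem.Set.add st.2 name) else st)
    ([], PySem.Set.empty)
  -- second loop: add remaining headers
  let st2 := keys.foldl
    (fun (st : List String × PySem.Set String) key =>
      if ¬ key ∈ st.2 then (st.1 ++ [key], PySem.Set.add st.2 key) else st)
    st1
  st2.1

-- ===== PORT B =====
-- port of Source B's local 'rank' closure ('preferred' passed explicitly)
def ocRank (preferred : List String) (k : String) : Int :=
  match PySem.List.index? preferred k with
  | some i => (i : Int)
  | none => (preferred.length : Int)

def order_commander_headers_py_alt (keys : List String) : List String :=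
  let preferred : List String :=
    ["Signature Cards", "High Synergy Cards", "Top Cards", "New Cards",
     "Top Partners", "Top Commanders", "New Commanders", "Combo Cards",
     "Combos", "Creatures", "Instants", "Sorceries", "Artifacts",
     "Enchantments", "Planeswalkers", "Lands"]
  let deduped := PySem.List.dedup keys
  -- [k for i in range(len(preferred)+1) for k in deduped if rank(k) == i]
  (PySem.List.pyRange 0 ((preferred.length : Int) + 1) 1).flatMap
    (fun i => deduped.filter (fun k => ocRank preferred k == i))

-- ===== PRECONDITION & SPEC =====
def Spec_order_commander_headers_py (keys : List String) (out : List String) : Prop := out = order_commander_headers_py_alt keys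
instance (keys : List String) (out : List String) : Decidable (Spec_order_commander_headers_py keys out) := by unfold Spec_order_commander_headers_py; infer_instance

-- ===== CLAIM (what is proved, stated in full; the proofs are below) =====
def Claim_equal_order_commander_headers_py : Prop := ∀ (keys : List String), Dom_order_commander_headers_py keys → Spec_order_commander_headers_py keys (order_commander_headers_py keys)

-- ===== LEMMAS AND PROOFS =====

-- the fixed preference list, named for the proofs
def ocPref : List String :=
  ["Signature Cards", "High Synergy Cards", "Top Cards", "New Cards",
   "Top Partners", "Top Commanders", "New Commanders", "Combo Cards",
   "Combos", "Creatures", "Instants", "Sorceries", "Artifacts",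
   "Enchantments", "Planeswalkers", "Lands"]

theorem ocAdd_mem {s : List String} {k : String} (hk : k ∈ s) : PySem.Set.add s k = s := by
  simp [PySem.Set.add, PySem.Set.contains, hk]

theorem ocAdd_not_mem {s : List String} {k : String} (hk : k ∉ s) : PySem.Set.add s k = s ++ [k] := by
  simp [PySem.Set.add, PySem.Set.contains, hk]

theorem ocRank_nonneg (p : List String) (k : String) : 0 ≤ ocRank p k := by
  unfold ocRank
  cases h : PySem.List.index? p k <;> simp

-- sequential dedup of a list against an initial 'seen' list (proof-side model of A's second loop)
def ocDD (seen : List String) : List String → List String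
  | [] => []
  | k :: ks => if k ∈ seen then ocDD seen ks else k :: ocDD (seen ++ [k]) ks

theorem ocDD_subset (ks : List String) : ∀ (seen : List String) (x : String), x ∈ ocDD seen ks → x ∈ ks := by
  induction ks with
  | nil => intro seen x h; simp [ocDD] at h
  | cons k ks ih =>
    intro seen x h
    by_cases hk : k ∈ seen
    · simp only [ocDD, if_pos hk] at h
      exact List.mem_cons_of_mem _ (ih _ _ h)
    · simp only [ocDD, if_neg hk, List.mem_cons] at h
      rcases h with h | h
      · simp [h]
      · exact List.mem_cons_of_mem _ (ih _ _ h)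

theorem ocDD_filter (ks : List String) : ∀ (seen : List String),
    ocDD seen ks = (ocDD [] ks).filter (fun k => !decide (k ∈ seen)) := by
  induction ks with
  | nil => intro seen; simp [ocDD]
  | cons k ks ih =>
    intro seen
    have h1 : ocDD [] (k :: ks) = k :: ocDD [k] ks := by simp [ocDD]
    by_cases hk : k ∈ seen
    · rw [h1, List.filter_cons]
      rw [if_neg (by simp [hk])]
      rw [ocDD, if_pos hk, ih seen, ih [k], List.filter_filter]
      apply List.filter_congr
      intro x _
      by_cases hx : x = k
      · subst hx; simp [hk]
      · simp [hx]
    · rw [h1, List.filter_cons]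
      rw [if_pos (by simp [hk])]
      rw [ocDD, if_neg hk, ih (seen ++ [k]), ih [k], List.filter_filter]
      congr 1
      apply List.filter_congr
      intro x _
      by_cases hx : x = k
      · subst hx; simp
      · simp [hx]

theorem foldl_add_eq_ocDD (ks : List String) : ∀ (s : List String),
    ks.foldl PySem.Set.add s = s ++ ocDD s ks := by
  induction ks with
  | nil => intro s; simp [ocDD]
  | cons k ks ih =>
    intro s
    by_cases hk : k ∈ s
    · rw [List.foldl_cons, ocAdd_mem hk]
      rw [ih s, ocDD, if_pos hk]
    · rw [List.foldl_cons, ocAdd_not_mem hk]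
      rw [ih (s ++ [k]), ocDD, if_neg hk]
      simp

theorem dedup_eq_ocDD (ks : List String) : PySem.List.dedup ks = ocDD [] ks := by
  rw [PySem.List.dedup_eq_ofList, PySem.Set.ofList_eq_foldl, foldl_add_eq_ocDD]
  simp

-- A's first loop
theorem ocLoop1 (keys : List String) (p : List String) : ∀ (ord seen : List String),
    p.Nodup → (∀ x ∈ p, x ∉ seen) →
    p.foldl
      (fun (st : List String × PySem.Set String) name =>
        if name ∈ keys ∧ ¬ name ∈ st.2 then (st.1 ++ [name], PySem.Set.add st.2 name) else st)
      (ord, seen)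
    = (ord ++ p.filter (fun n => decide (n ∈ keys)), seen ++ p.filter (fun n => decide (n ∈ keys))) := by
  induction p with
  | nil => intro ord seen _ _; simp
  | cons n p ih =>
    intro ord seen hnd hdisj
    have hn : n ∉ seen := hdisj n List.mem_cons_self
    by_cases hk : n ∈ keys
    · rw [List.foldl_cons, if_pos ⟨hk, hn⟩]
      simp only [ocAdd_not_mem hn]
      rw [ih (ord ++ [n]) (seen ++ [n]) hnd.of_cons ?disj]
      case disj =>
        intro x hx
        simp only [List.mem_append, List.mem_singleton]
        rintro (h | h)
        · exact hdisj x (List.mem_cons_of_mem _ hx) h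
        · exact (List.nodup_cons.mp hnd).1 (h ▸ hx)
      simp [hk]
    · rw [List.foldl_cons, if_neg (by tauto)]
      rw [ih ord seen hnd.of_cons (fun x hx => hdisj x (List.mem_cons_of_mem _ hx))]
      simp [hk]

-- A's second loop
theorem ocLoop2 (ks : List String) : ∀ (ord seen : List String),
    ks.foldl
      (fun (st : List String × PySem.Set String) key =>
        if ¬ key ∈ st.2 then (st.1 ++ [key], PySem.Set.add st.2 key) else st)
      (ord, seen)
    = (ord ++ ocDD seen ks, seen ++ ocDD seen ks) := by
  induction ks with
  | nil => intro ord seen; simp [ocDD]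
  | cons k ks ih =>
    intro ord seen
    by_cases hk : k ∈ seen
    · rw [List.foldl_cons, if_neg (by simpa using hk)]
      rw [ih, ocDD, if_pos hk]
    · rw [List.foldl_cons, if_pos (by simpa using hk)]
      simp only [ocAdd_not_mem hk]
      rw [ih, ocDD, if_neg hk]
      simp

theorem filter_beq_nodup (d : List String) (n : String) (hd : d.Nodup) :
    d.filter (fun k => k == n) = if n ∈ d then [n] else [] := by
  rw [List.filter_beq]
  by_cases h : n ∈ d
  · rw [List.count_eq_one_of_mem hd h]; simp [h]
  · rw [List.count_eq_zero_of_not_mem h]; simp [h]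

theorem ocBuckets (p : List String) : ∀ (d : List String), p.Nodup → d.Nodup →
    (List.range (p.length + 1)).flatMap
        (fun (i : Nat) => d.filter (fun k => ocRank p k == (i : Int)))
    = p.filter (fun n => decide (n ∈ d)) ++ d.filter (fun k => !decide (k ∈ p)) := by
  induction p with
  | nil =>
    intro d _ _
    simp [List.range_succ, ocRank, PySem.List.index?]
  | cons n p ih =>
    intro d hp hd
    have hnp : n ∉ p := (List.nodup_cons.mp hp).1
    have hrank : ∀ x, x ≠ n → ocRank (n :: p) x = ocRank p x + 1 := by
      intro x hx
      unfold ocRank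
      rw [PySem.List.index?_cons_of_ne _ (fun h => hx h.symm)]
      cases h : PySem.List.index? p x with
      | some i => simp
      | none => simp [List.length_cons]
    rw [show (n :: p).length + 1 = (p.length + 1) + 1 from rfl, List.range_succ_eq_map,
        List.flatMap_cons, List.flatMap_map]
    have h0 : d.filter (fun k => ocRank (n :: p) k == ((0 : Nat) : Int))
        = if n ∈ d then [n] else [] := by
      rw [← filter_beq_nodup d n hd]
      apply List.filter_congr
      intro x _
      by_cases hx : x = n
      · subst hx
        unfold ocRank
        rw [PySem.List.index?_cons_self]
        simp
      · rw [hrank x hx]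
        have := ocRank_nonneg p x
        rw [Bool.eq_iff_iff]
        simp [hx, beq_iff_eq]
        omega
    have hsucc : ∀ i : Nat, d.filter (fun k => ocRank (n :: p) k == ((Nat.succ i : Nat) : Int))
        = (d.filter (fun k => !(k == n))).filter (fun k => ocRank p k == (i : Int)) := by
      intro i
      rw [List.filter_filter]
      apply List.filter_congr
      intro x _
      by_cases hx : x = n
      · subst hx
        unfold ocRank
        rw [PySem.List.index?_cons_self]
        rw [Bool.eq_iff_iff]
        simp
        omega
      · rw [hrank x hx]
        rw [Bool.eq_iff_iff]
        simp [hx, beq_iff_eq]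
    rw [h0]
    have hflat : (List.range (p.length + 1)).flatMap
          (fun (i : Nat) => d.filter (fun k => ocRank (n :: p) k == ((Nat.succ i : Nat) : Int)))
        = (List.range (p.length + 1)).flatMap
          (fun (i : Nat) => (d.filter (fun k => !(k == n))).filter (fun k => ocRank p k == (i : Int))) := by
      congr 1
      funext i
      exact hsucc i
    rw [hflat, ih (d.filter (fun k => !(k == n))) (List.nodup_cons.mp hp).2 (hd.filter _)]
    have e1 : p.filter (fun m => decide (m ∈ d.filter (fun k => !(k == n))))
        = p.filter (fun m => decide (m ∈ d)) := by
      apply List.filter_congr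
      intro x hx
      have hxn : x ≠ n := fun h => hnp (h ▸ hx)
      simp [List.mem_filter, hxn]
    have e2 : (d.filter (fun k => !(k == n))).filter (fun k => !decide (k ∈ p))
        = d.filter (fun k => !decide (k ∈ n :: p)) := by
      rw [List.filter_filter]
      apply List.filter_congr
      intro x _
      by_cases hx : x = n
      · subst hx; simp
      · simp [hx, List.mem_cons]
    have e3 : (n :: p).filter (fun m => decide (m ∈ d))
        = (if n ∈ d then [n] else []) ++ p.filter (fun m => decide (m ∈ d)) := by
      by_cases h : n ∈ d <;> simp [h]
    rw [e1, e2, e3, List.append_assoc]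

-- canonical form for A
theorem ocA_eq (keys : List String) :
    order_commander_headers_py keys
    = ocPref.filter (fun m => decide (m ∈ keys))
      ++ (PySem.List.dedup keys).filter (fun k => !decide (k ∈ ocPref)) := by
  show (keys.foldl _ (ocPref.foldl _ ([], PySem.Set.empty))).1 = _
  rw [show (PySem.Set.empty : PySem.Set String) = ([] : List String) from rfl]
  rw [ocLoop1 keys ocPref [] [] (by decide) (by simp)]
  simp only [List.nil_append]
  rw [ocLoop2 keys (ocPref.filter (fun m => decide (m ∈ keys))) (ocPref.filter (fun m => decide (m ∈ keys)))]
  simp only []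
  congr 1
  rw [ocDD_filter, dedup_eq_ocDD]
  apply List.filter_congr
  intro x hx
  have hxk : x ∈ keys := ocDD_subset keys [] x hx
  simp [List.mem_filter, hxk]

-- canonical form for B
theorem ocB_eq (keys : List String) :
    order_commander_headers_py_alt keys
    = ocPref.filter (fun m => decide (m ∈ keys))
      ++ (PySem.List.dedup keys).filter (fun k => !decide (k ∈ ocPref)) := by
  show (PySem.List.pyRange 0 ((ocPref.length : Int) + 1) 1).flatMap
      (fun i => (PySem.List.dedup keys).filter (fun k => ocRank ocPref k == i)) = _
  rw [show ((ocPref.length : Int) + 1) = ((17 : Nat) : Int) from by norm_num [ocPref]]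
  rw [PySem.List.pyRange_zero_natCast, List.flatMap_map]
  rw [show (17 : Nat) = ocPref.length + 1 from by norm_num [ocPref]]
  rw [ocBuckets ocPref (PySem.List.dedup keys) (by decide) (PySem.List.nodup_dedup keys)]
  congr 1
  apply List.filter_congr
  intro x _
  simp

-- ===== VERDICT (by name: the statement is the Claim_ definition above) =====
theorem order_commander_headers_py_spec : Claim_equal_order_commander_headers_py := by
  intro keys _
  show order_commander_headers_py keys = order_commander_headers_py_alt keys
  rw [ocA_eq, ocB_eq]
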